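-- pv_equiv track=rewrite | github.com/leihchen/leetcode | mac/msft.py | minCutGcd
-- ===== SOURCE A (Python) =====
-- import math
--
-- def minCutGcd(nums):
--     n = len(nums)
--     dp = [0] * n
--     dp[0] = 1
--     for i in range(1,n):
--         dp[i] = dp[i-1] + 1
--         for j in range(i):
--             if math.gcd(nums[j], nums[i]) > 1:
--                 dp[i] = min(dp[i], (dp[j-1] + 1) if j-1 >= 0 else 1)
--     return dp[-1]
-- ===== SOURCE B (Python) =====
-- import math
--
-- def _primes(v):
--     # distinct prime factors of v (v >= 2) by trial division
--     ps = []
--     d = 2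
--     while d * d <= v:
--         if v % d == 0:
--             ps.append(d)
--             while v % d == 0:
--                 v //= d
--         d += 1 if d == 2 else 2
--     if v > 1:
--         ps.append(v)
--     return ps
--
-- def minCutGcd(nums):
--     best = {}            # prime -> min dp of the element just before an occurrence
--     best_zero = None     # same minimum over occurrences of 0
--     best_nonunit = None  # same minimum over elements with |x| > 1
--     prev = 0             # dp value of the previous element (0 before the first)
--     cur = 0
--     for x in nums:
--         v = abs(x)
--         m = prev
--         if v > 1:
--             for p in _primes(v):
--                 if p in best and best[p] < m:
--                     m = best[p]
--             if best_zero is not None and best_zero < m: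
--                 m = best_zero
--         elif v == 0:
--             if best_nonunit is not None and best_nonunit < m:
--                 m = best_nonunit
--         cur = m + 1
--         if v > 1:
--             for p in _primes(v):
--                 if p not in best or prev < best[p]:
--                     best[p] = prev
--             if best_nonunit is None or prev < best_nonunit:
--                 best_nonunit = prev
--         elif v == 0:
--             if best_zero is None or prev < best_zero:
--                 best_zero = prev
--         prev = cur
--     return cur
-- ===== Notes on version B (the rewrite author's own statement) =====
-- stated objective: faster
-- what changed: A's O(n^2) scan of all earlier endpoints per element is replaced by one pass that factorizes each element and keeps, per prime factor (plus 'zero' and 'nonunit' buckets), the minimum dp value of any earlier compatible endpoint, so the inner scan over previous indices disappears.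
import Mathlib
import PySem

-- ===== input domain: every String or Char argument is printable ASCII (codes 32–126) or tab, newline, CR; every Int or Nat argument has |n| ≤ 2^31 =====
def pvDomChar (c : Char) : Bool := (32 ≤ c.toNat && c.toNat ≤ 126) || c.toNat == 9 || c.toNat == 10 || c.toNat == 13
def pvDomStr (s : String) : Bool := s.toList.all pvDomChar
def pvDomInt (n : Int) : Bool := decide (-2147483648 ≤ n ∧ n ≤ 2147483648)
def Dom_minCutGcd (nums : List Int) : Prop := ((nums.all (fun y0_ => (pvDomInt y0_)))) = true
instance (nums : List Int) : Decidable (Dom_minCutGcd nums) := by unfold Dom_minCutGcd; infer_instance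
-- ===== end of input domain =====

-- B replaces A's quadratic scan over all earlier endpoints by a per-prime running minimum
-- (factorize each element, query/update its primes); same return value on every non-empty list.

-- ===== PORT A =====
-- inner 'for j in range(i)' loop of A, as a helper (literal body)
def aInner (nums : List Int) (i : Int) (dp : List Int) : List Int :=
  (PySem.List.pyRange 0 i 1).foldl (fun dp j =>
    if 1 < Int.gcd (PySem.List.pyGetD nums j 0) (PySem.List.pyGetD nums i 0) then
      PySem.List.pySetD dp i (min (PySem.List.pyGetD dp i 0)
        (if 0 ≤ j - 1 then PySem.List.pyGetD dp (j - 1) 0 + 1 else 1))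
    else dp) dp

-- A: dp over prefixes with a full scan of earlier indices; dp[0]=1 raises IndexError on [] (see Pre_)
def minCutGcd (nums : List Int) : Int :=
  let n : Int := (nums.length : Int)
  let dp : List Int := List.replicate n.toNat 0
  let dp := PySem.List.pySetD dp 0 1
  let dp := (PySem.List.pyRange 1 n 1).foldl (fun dp i =>
      aInner nums i (PySem.List.pySetD dp i (PySem.List.pyGetD dp (i - 1) 0 + 1))) dp
  PySem.List.pyGetD dp (-1) 0

-- ===== PORT B =====
-- Source B's _primes inner while-loop 'while v % d == 0: v //= d' (Nat arithmetic: v, d ≥ 0; exact, Python // and % on nonnegative ints)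
def pbStrip (v d : Nat) : Nat :=
  if h : 2 ≤ d ∧ 0 < v ∧ v % d = 0 then pbStrip (v / d) d else v
termination_by v
decreasing_by exact Nat.div_lt_self h.2.1 (by omega)

theorem pbStrip_le (v d : Nat) : pbStrip v d ≤ v := by
  induction v using pbStrip.induct (d := d) with
  | case1 x h ih =>
      rw [pbStrip]; simp only [h]
      exact le_trans ih (Nat.div_le_self _ _)
  | case2 x h => rw [pbStrip, dif_neg h]

-- Source B's _primes outer while-loop 'while d * d <= v' (d steps 2, 3, 5, 7, …)
def pbLoop (v d : Nat) : List Nat :=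
  if d * d ≤ v then
    if v % d = 0 then d :: pbLoop (pbStrip v d) (d + if d = 2 then 1 else 2)
    else pbLoop v (d + if d = 2 then 1 else 2)
  else if 1 < v then [v] else []
termination_by v + 2 - d
decreasing_by
  · have h1 := pbStrip_le v d
    have h2 : d ≤ v + 1 := by
      rcases Nat.eq_zero_or_pos d with h | h
      · omega
      · have : d * 1 ≤ d * d := Nat.mul_le_mul_left d (by omega)
        omega
    split <;> omega
  · have h2 : d ≤ v + 1 := by
      rcases Nat.eq_zero_or_pos d with h | h
      · omega
      · have : d * 1 ≤ d * d := Nat.mul_le_mul_left d (by omega)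
        omega
    split <;> omega

-- Source B's _primes(v): distinct prime factors of v by trial division
def primesB (v : Nat) : List Nat := pbLoop v 2

-- Source B's query loop 'for p in _primes(v): if p in best and best[p] < m: m = best[p]'
def qfold (best : PySem.Dict Nat Int) (prev : Int) (ks : List Nat) : Int :=
  ks.foldl (fun m p => match best.get? p with
    | some b => if b < m then b else m
    | none => m) prev

-- Source B's update loop 'for p in _primes(v): if p not in best or prev < best[p]: best[p] = prev'
def ufold (best : PySem.Dict Nat Int) (prev : Int) (ks : List Nat) : PySem.Dict Nat Int :=
  ks.foldl (fun best p => match best.get? p with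
    | some b => if prev < b then best.insert p prev else best
    | none => best.insert p prev) best

-- 'if o is None or prev < o: o = prev' (shared by best_zero / best_nonunit)
def bUpd (o : Option Int) (prev : Int) : Int :=
  match o with
  | some b => if prev < b then prev else b
  | none => prev

-- the 'm = prev; if v > 1: … elif v == 0: …' query block of Source B's main loop
def bQuery (best : PySem.Dict Nat Int) (bz bn : Option Int) (prev : Int) (v : Nat) : Int :=
  if 1 < v then
    let m1 := qfold best prev (primesB v)
    match bz with
    | some b => if b < m1 then b else m1
    | none => m1
  else if v = 0 then
    match bn with
    | some b => if b < prev then b else prev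
    | none => prev
  else prev

-- one iteration of Source B's main loop; state = (best, best_zero, best_nonunit, prev, cur)
def bStep : PySem.Dict Nat Int × Option Int × Option Int × Int × Int → Int →
    PySem.Dict Nat Int × Option Int × Option Int × Int × Int
  | (best, bz, bn, prev, _cur), x =>
    let v := x.natAbs
    let cur := bQuery best bz bn prev v + 1
    let best' := if 1 < v then ufold best prev (primesB v) else best
    let bn' := if 1 < v then some (bUpd bn prev) else bn
    let bz' := if v = 0 then some (bUpd bz prev) else bz
    (best', bz', bn', cur, cur)

def minCutGcd_alt (nums : List Int) : Int :=
  (nums.foldl bStep (PySem.Dict.empty, none, none, 0, 0)).2.2.2.2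

-- ===== PRECONDITION & SPEC =====
-- Pre_ excludes only the empty list, on which A raises IndexError at 'dp[0] = 1'.
def Pre_minCutGcd (nums : List Int) : Prop := nums ≠ []
instance (nums : List Int) : Decidable (Pre_minCutGcd nums) := by unfold Pre_minCutGcd; infer_instance
def pvWitness_minCutGcd : List Int := [6, 10, 15]

def Spec_minCutGcd (nums : List Int) (out : Int) : Prop := out = minCutGcd_alt nums
instance (nums : List Int) (out : Int) : Decidable (Spec_minCutGcd nums out) := by unfold Spec_minCutGcd; infer_instance

-- ===== CLAIM (what is proved, stated in full; the proofs are below) =====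
def Claim_equal_minCutGcd : Prop := ∀ (nums : List Int), Dom_minCutGcd nums → Pre_minCutGcd nums → Spec_minCutGcd nums (minCutGcd nums)

-- ===== LEMMAS AND PROOFS =====

/- ---------- the common reference: one left-to-right pass keeping (value, dp-before) pairs ---------- -/

-- min over earlier (value, prev-dp) pairs whose value shares a factor with x, seeded with m0
def seenFold (x m0 : Int) (seen : List (Int × Int)) : Int :=
  seen.foldl (fun m ap => if 1 < Int.gcd ap.1 x then min m ap.2 else m) m0

def goRef : List (Int × Int) → Int → List Int → Int
  | _, prev, [] => prev
  | seen, prev, x :: rest => goRef (seen ++ [(x, prev)]) (seenFold x prev seen + 1) rest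

def goAll : List (Int × Int) → Int → List Int → List Int
  | _, _, [] => []
  | seen, prev, x :: rest =>
      (seenFold x prev seen + 1) :: goAll (seen ++ [(x, prev)]) (seenFold x prev seen + 1) rest

theorem goAll_length (xs : List Int) : ∀ seen prev, (goAll seen prev xs).length = xs.length := by
  induction xs with
  | nil => intro seen prev; rfl
  | cons x rest ih => intro seen prev; simpa [goAll] using ih _ _

theorem goAll_getLast? (xs : List Int) :
    ∀ seen prev, xs ≠ [] → (goAll seen prev xs).getLast? = some (goRef seen prev xs) := by
  induction xs with
  | nil => intro _ _ h; exact absurd rfl h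
  | cons x rest ih =>
      intro seen prev _
      cases rest with
      | nil => rfl
      | cons y t =>
          calc (goAll seen prev (x :: y :: t)).getLast?
              = ((seenFold x prev seen + 1) ::
                  (seenFold y (seenFold x prev seen + 1) (seen ++ [(x, prev)]) + 1) ::
                  goAll ((seen ++ [(x, prev)]) ++ [(y, seenFold x prev seen + 1)])
                    (seenFold y (seenFold x prev seen + 1) (seen ++ [(x, prev)]) + 1) t).getLast? := rfl
            _ = (goAll (seen ++ [(x, prev)]) (seenFold x prev seen + 1) (y :: t)).getLast? :=
                  List.getLast?_cons_cons
            _ = some (goRef (seen ++ [(x, prev)]) (seenFold x prev seen + 1) (y :: t)) :=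
                  ih _ _ (by simp)
            _ = some (goRef seen prev (x :: y :: t)) := rfl

-- the dp value at index k, characterized by the pairs before it
theorem goAll_getD (xs : List Int) : ∀ (seen : List (Int × Int)) (prev : Int) (k : Nat), k < xs.length →
    (goAll seen prev xs).getD k 0 =
      seenFold (xs.getD k 0) ((prev :: goAll seen prev xs).getD k 0)
        (seen ++ (List.range k).map (fun j => (xs.getD j 0, (prev :: goAll seen prev xs).getD j 0))) + 1 := by
  induction xs with
  | nil => intro _ _ k hk; simp at hk
  | cons x rest ih =>
      intro seen prev k hk
      have hcons : goAll seen prev (x :: rest)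
          = (seenFold x prev seen + 1) :: goAll (seen ++ [(x, prev)]) (seenFold x prev seen + 1) rest := rfl
      cases k with
      | zero =>
          rw [hcons]
          simp only [List.getD_cons_zero, List.range_zero, List.map_nil, List.append_nil]
      | succ k =>
          have hrec := ih (seen ++ [(x, prev)]) (seenFold x prev seen + 1) k (by simpa using hk)
          rw [hcons]
          simp only [List.getD_cons_succ]
          rw [hrec]
          have hseen : (seen ++ [(x, prev)]) ++ (List.range k).map
                (fun j => (rest.getD j 0, ((seenFold x prev seen + 1) ::
                  goAll (seen ++ [(x, prev)]) (seenFold x prev seen + 1) rest).getD j 0))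
              = seen ++ (List.range (k + 1)).map
                (fun j => ((x :: rest).getD j 0, (prev :: (seenFold x prev seen + 1) ::
                  goAll (seen ++ [(x, prev)]) (seenFold x prev seen + 1) rest).getD j 0)) := by
            rw [List.range_succ_eq_map, List.map_cons, List.map_map, List.append_assoc]
            apply congrArg
            congr 1
          rw [hseen]

/- ---------- characterization of seenFold as a minimum ---------- -/

theorem seenFold_le_init (x : Int) (seen : List (Int × Int)) : ∀ m0, seenFold x m0 seen ≤ m0 := by
  induction seen with
  | nil => intro m0; exact le_refl m0
  | cons a l ih =>
      intro m0
      calc seenFold x m0 (a :: l)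
          = seenFold x (if 1 < Int.gcd a.1 x then min m0 a.2 else m0) l := rfl
        _ ≤ (if 1 < Int.gcd a.1 x then min m0 a.2 else m0) := ih _
        _ ≤ m0 := by split <;> simp

theorem seenFold_le_mem (x : Int) (seen : List (Int × Int)) :
    ∀ m0, ∀ ap ∈ seen, 1 < Int.gcd ap.1 x → seenFold x m0 seen ≤ ap.2 := by
  induction seen with
  | nil => intro _ ap h; simp at h
  | cons a l ih =>
      intro m0 ap hap hc
      rcases List.mem_cons.mp hap with rfl | hmem
      · calc seenFold x m0 (ap :: l)
            = seenFold x (if 1 < Int.gcd ap.1 x then min m0 ap.2 else m0) l := rfl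
          _ ≤ (if 1 < Int.gcd ap.1 x then min m0 ap.2 else m0) := seenFold_le_init _ _ _
          _ ≤ ap.2 := by rw [if_pos hc]; exact min_le_right _ _
      · exact ih _ ap hmem hc

theorem seenFold_cases (x : Int) (seen : List (Int × Int)) :
    ∀ m0, seenFold x m0 seen = m0 ∨ ∃ ap ∈ seen, 1 < Int.gcd ap.1 x ∧ seenFold x m0 seen = ap.2 := by
  induction seen with
  | nil => intro m0; exact Or.inl rfl
  | cons a l ih =>
      intro m0
      have hstep : seenFold x m0 (a :: l)
          = seenFold x (if 1 < Int.gcd a.1 x then min m0 a.2 else m0) l := rfl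
      rcases ih (if 1 < Int.gcd a.1 x then min m0 a.2 else m0) with h | ⟨ap, hmem, hc, he⟩
      · by_cases hcond : 1 < Int.gcd a.1 x
        · rw [if_pos hcond] at h
          rcases le_total m0 a.2 with hle | hle
          · left; rw [hstep, if_pos hcond, h, min_eq_left hle]
          · right
            exact ⟨a, List.mem_cons_self, hcond, by rw [hstep, if_pos hcond, h, min_eq_right hle]⟩
        · rw [if_neg hcond] at h; left; rw [hstep, if_neg hcond, h]
      · right; exact ⟨ap, List.mem_cons_of_mem _ hmem, hc, by rw [hstep, he]⟩

theorem seenFold_eq_of_char (x m0 : Int) (seen : List (Int × Int)) (r : Int)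
    (h1 : r ≤ m0) (h2 : ∀ ap ∈ seen, 1 < Int.gcd ap.1 x → r ≤ ap.2)
    (h3 : r = m0 ∨ ∃ ap ∈ seen, 1 < Int.gcd ap.1 x ∧ r = ap.2) : seenFold x m0 seen = r := by
  apply le_antisymm
  · rcases h3 with rfl | ⟨ap, hmem, hc, rfl⟩
    · exact seenFold_le_init x seen r
    · exact seenFold_le_mem x seen m0 ap hmem hc
  · rcases seenFold_cases x seen m0 with h | ⟨ap, hmem, hc, he⟩
    · rw [h]; exact h1
    · rw [he]; exact h2 ap hmem hc

/- ---------- number theory: shared factor ↔ shared prime ---------- -/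

theorem gcd_one_lt_iff (a x : Int) : 1 < Int.gcd a x ↔
    (a.natAbs = 0 ∧ 1 < x.natAbs) ∨ (x.natAbs = 0 ∧ 1 < a.natAbs) ∨
    (1 < a.natAbs ∧ 1 < x.natAbs ∧ ∃ q : Nat, q.Prime ∧ q ∣ a.natAbs ∧ q ∣ x.natAbs) := by
  show 1 < Nat.gcd a.natAbs x.natAbs ↔ _
  constructor
  · intro h
    rcases Nat.eq_zero_or_pos a.natAbs with hm | hm
    · left; refine ⟨hm, ?_⟩; rwa [hm, Nat.gcd_zero_left] at h
    rcases Nat.eq_zero_or_pos x.natAbs with hn | hn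
    · right; left; refine ⟨hn, ?_⟩; rwa [hn, Nat.gcd_zero_right] at h
    obtain ⟨q, hq, hdvd⟩ := Nat.exists_prime_and_dvd (n := Nat.gcd a.natAbs x.natAbs) (by omega)
    have hqa : q ∣ a.natAbs := hdvd.trans (Nat.gcd_dvd_left _ _)
    have hqx : q ∣ x.natAbs := hdvd.trans (Nat.gcd_dvd_right _ _)
    have h2 := hq.two_le
    have ha2 := Nat.le_of_dvd hm hqa
    have hx2 := Nat.le_of_dvd hn hqx
    exact Or.inr (Or.inr ⟨by omega, by omega, q, hq, hqa, hqx⟩)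
  · rintro (⟨hm, hn⟩ | ⟨hn, hm⟩ | ⟨hm, hn, q, hq, hqa, hqx⟩)
    · rwa [hm, Nat.gcd_zero_left]
    · rwa [hn, Nat.gcd_zero_right]
    · have hdvd : q ∣ Nat.gcd a.natAbs x.natAbs := Nat.dvd_gcd hqa hqx
      have hpos : 0 < Nat.gcd a.natAbs x.natAbs := Nat.gcd_pos_of_pos_left _ (by omega)
      have := Nat.le_of_dvd hpos hdvd
      have := hq.two_le
      omega

/- ---------- trial division produces exactly the prime factors ---------- -/

theorem pbStrip_dvd (v d : Nat) : pbStrip v d ∣ v := by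
  induction v using pbStrip.induct (d := d) with
  | case1 x h ih =>
      rw [pbStrip, dif_pos h]
      have hdvd : d ∣ x := Nat.dvd_of_mod_eq_zero h.2.2
      exact ih.trans ⟨d, (Nat.div_mul_cancel hdvd).symm⟩
  | case2 x h => rw [pbStrip, dif_neg h]

theorem pbStrip_pos (v d : Nat) (hv : 0 < v) : 0 < pbStrip v d := by
  induction v using pbStrip.induct (d := d) with
  | case1 x h ih =>
      rw [pbStrip, dif_pos h]
      have hdvd : d ∣ x := Nat.dvd_of_mod_eq_zero h.2.2
      have hle : d ≤ x := Nat.le_of_dvd h.2.1 hdvd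
      exact ih (Nat.div_pos hle (by omega))
  | case2 x h => rw [pbStrip, dif_neg h]; exact hv

theorem pbStrip_not_dvd (v d : Nat) (hd : 2 ≤ d) (hv : 0 < v) : ¬ d ∣ pbStrip v d := by
  induction v using pbStrip.induct (d := d) with
  | case1 x h ih =>
      rw [pbStrip, dif_pos h]
      have hdvd : d ∣ x := Nat.dvd_of_mod_eq_zero h.2.2
      have hle : d ≤ x := Nat.le_of_dvd h.2.1 hdvd
      exact ih (Nat.div_pos hle (by omega))
  | case2 x h =>
      rw [pbStrip, dif_neg h]
      intro hdvd
      exact h ⟨hd, hv, Nat.mod_eq_zero_of_dvd hdvd⟩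

theorem dvd_pbStrip (v d q : Nat) (hd : d.Prime) (hq : q.Prime) (hne : q ≠ d) :
    q ∣ v → q ∣ pbStrip v d := by
  induction v using pbStrip.induct (d := d) with
  | case1 x h ih =>
      intro hqx
      rw [pbStrip, dif_pos h]
      have hdvd : d ∣ x := Nat.dvd_of_mod_eq_zero h.2.2
      refine ih ?_
      have hx : x = d * (x / d) := (Nat.mul_div_cancel' hdvd).symm
      rcases (Nat.Prime.dvd_mul hq).mp (hx ▸ hqx) with hqd | hqd
      · exact absurd ((Nat.prime_dvd_prime_iff_eq hq hd).mp hqd) hne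
      · exact hqd
  | case2 x h => intro hqx; rwa [pbStrip, dif_neg h]

theorem pbLoop_bump (d : Nat) (hd : 2 ≤ d) (hodd : d = 2 ∨ d % 2 = 1) (q : Nat) (hq : q.Prime)
    (hdq : d ≤ q) (hne : q ≠ d) : (d + if d = 2 then 1 else 2) ≤ q := by
  rcases hodd with h2 | h2
  · subst h2; split <;> omega
  · have hq1 : q ≠ d + 1 := by
      intro he
      have : q = 2 := (Nat.Prime.even_iff hq).mp (by rw [he]; exact (Nat.even_iff).mpr (by omega))
      omega
    split <;> omega

theorem pbLoop_step_props (d : Nat) (hd : 2 ≤ d) (hodd : d = 2 ∨ d % 2 = 1) :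
    2 ≤ (d + if d = 2 then 1 else 2) ∧
    ((d + if d = 2 then 1 else 2) = 2 ∨ (d + if d = 2 then 1 else 2) % 2 = 1) := by
  rcases hodd with h2 | h2
  · subst h2; split <;> omega
  · split <;> omega

theorem pbLoop_spec : ∀ v d : Nat, 2 ≤ d → (d = 2 ∨ d % 2 = 1) → 0 < v →
    (∀ q : Nat, q.Prime → q ∣ v → d ≤ q) →
    ∀ q, (q ∈ pbLoop v d ↔ q.Prime ∧ q ∣ v) := by
  intro v d
  induction v, d using pbLoop.induct with
  | case1 v d h1 h2 ih =>
      intro hd hodd hv hmin q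
      have hdvd : d ∣ v := Nat.dvd_of_mod_eq_zero h2
      have hdprime : d.Prime := by
        rw [Nat.prime_def_minFac]
        refine ⟨hd, ?_⟩
        have hmf := Nat.minFac_prime (show d ≠ 1 by omega)
        have h3 : d ≤ d.minFac := hmin _ hmf ((Nat.minFac_dvd d).trans hdvd)
        have h4 : d.minFac ≤ d := Nat.minFac_le (by omega)
        omega
      have hsp := pbStrip_pos v d hv
      have hsd := pbStrip_dvd v d
      have hnd := pbStrip_not_dvd v d hd hv
      obtain ⟨hd', hodd'⟩ := pbLoop_step_props d hd hodd
      have hmin' : ∀ r : Nat, r.Prime → r ∣ pbStrip v d → (d + if d = 2 then 1 else 2) ≤ r := by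
        intro r hr hrs
        have hrv : r ∣ v := hrs.trans hsd
        have hne : r ≠ d := fun he => hnd (he ▸ hrs)
        exact pbLoop_bump d hd hodd r hr (hmin r hr hrv) hne
      have ihq := ih hd' hodd' hsp hmin'
      rw [pbLoop, if_pos h1, if_pos h2]
      simp only [List.mem_cons]
      constructor
      · rintro (rfl | hmem)
        · exact ⟨hdprime, hdvd⟩
        · obtain ⟨hqp, hqd⟩ := (ihq q).mp hmem
          exact ⟨hqp, hqd.trans hsd⟩
      · rintro ⟨hqp, hqv⟩
        by_cases he : q = d
        · exact Or.inl he
        · exact Or.inr ((ihq q).mpr ⟨hqp, dvd_pbStrip v d q hdprime hqp he hqv⟩)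
  | case2 v d h1 h2 ih =>
      intro hd hodd hv hmin q
      obtain ⟨hd', hodd'⟩ := pbLoop_step_props d hd hodd
      have hndvd : ¬ d ∣ v := fun hdvd => h2 (Nat.mod_eq_zero_of_dvd hdvd)
      have hmin' : ∀ r : Nat, r.Prime → r ∣ v → (d + if d = 2 then 1 else 2) ≤ r := by
        intro r hr hrv
        have hne : r ≠ d := fun he => hndvd (he ▸ hrv)
        exact pbLoop_bump d hd hodd r hr (hmin r hr hrv) hne
      rw [pbLoop, if_pos h1, if_neg h2]
      exact ih hd' hodd' hv hmin' q
  | case3 v d h1 hv1 =>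
      intro hd hodd hv hmin q
      rw [pbLoop, if_neg h1, if_pos hv1]
      · have hvp : v.Prime := by
          by_contra hnp
          have hsq := Nat.minFac_sq_le_self (by omega) hnp
          have hmf := Nat.minFac_prime (show v ≠ 1 by omega)
          have hdm : d ≤ v.minFac := hmin _ hmf (Nat.minFac_dvd v)
          have hmul : d * d ≤ v.minFac * v.minFac := Nat.mul_le_mul hdm hdm
          exact h1 (hmul.trans (by simpa [Nat.pow_two] using hsq))
        simp only [List.mem_singleton]
        constructor
        · rintro rfl; exact ⟨hvp, dvd_refl _⟩
        · rintro ⟨hqp, hqv⟩; exact (Nat.prime_dvd_prime_iff_eq hqp hvp).mp hqv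
  | case4 v d h1 hv1 =>
      intro hd hodd hv hmin q
      rw [pbLoop, if_neg h1, if_neg hv1]
      simp only [List.not_mem_nil, false_iff, not_and]
      intro hqp hqv
      have hv1' : v = 1 := by omega
      exact absurd (Nat.dvd_one.mp (hv1' ▸ hqv)) (Nat.Prime.ne_one hqp)

theorem pbLoop_nodup : ∀ v d : Nat, 2 ≤ d → (d = 2 ∨ d % 2 = 1) → 0 < v →
    (∀ q : Nat, q.Prime → q ∣ v → d ≤ q) → (pbLoop v d).Nodup := by
  intro v d
  induction v, d using pbLoop.induct with
  | case1 v d h1 h2 ih =>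
      intro hd hodd hv hmin
      have hsp := pbStrip_pos v d hv
      have hsd := pbStrip_dvd v d
      have hnd := pbStrip_not_dvd v d hd hv
      obtain ⟨hd', hodd'⟩ := pbLoop_step_props d hd hodd
      have hmin' : ∀ r : Nat, r.Prime → r ∣ pbStrip v d → (d + if d = 2 then 1 else 2) ≤ r := by
        intro r hr hrs
        have hne : r ≠ d := fun he => hnd (he ▸ hrs)
        exact pbLoop_bump d hd hodd r hr (hmin r hr (hrs.trans hsd)) hne
      rw [pbLoop, if_pos h1, if_pos h2]
      refine List.nodup_cons.mpr ⟨?_, ih hd' hodd' hsp hmin'⟩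
      intro hdmem
      obtain ⟨_, hdd⟩ := (pbLoop_spec _ _ hd' hodd' hsp hmin' d).mp hdmem
      exact hnd hdd
  | case2 v d h1 h2 ih =>
      intro hd hodd hv hmin
      obtain ⟨hd', hodd'⟩ := pbLoop_step_props d hd hodd
      have hndvd : ¬ d ∣ v := fun hdvd => h2 (Nat.mod_eq_zero_of_dvd hdvd)
      have hmin' : ∀ r : Nat, r.Prime → r ∣ v → (d + if d = 2 then 1 else 2) ≤ r := by
        intro r hr hrv
        exact pbLoop_bump d hd hodd r hr (hmin r hr hrv) (fun he => hndvd (he ▸ hrv))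
      rw [pbLoop, if_pos h1, if_neg h2]
      exact ih hd' hodd' hv hmin'
  | case3 v d h1 hv1 =>
      intro _ _ _ _
      rw [pbLoop, if_neg h1, if_pos hv1]
      exact List.nodup_singleton v
  | case4 v d h1 hv1 =>
      intro _ _ _ _
      rw [pbLoop, if_neg h1, if_neg hv1]
      exact List.nodup_nil

theorem mem_primesB (v : Nat) (hv : 0 < v) : ∀ q, q ∈ primesB v ↔ q.Prime ∧ q ∣ v := by
  exact pbLoop_spec v 2 (le_refl 2) (Or.inl rfl) hv (fun q hq _ => hq.two_le)

theorem primesB_of_le_one (v : Nat) (hv : v ≤ 1) : primesB v = [] := by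
  rw [primesB, pbLoop, if_neg (by omega), if_neg (by omega)]

theorem primesB_nodup (v : Nat) : (primesB v).Nodup := by
  rcases Nat.eq_zero_or_pos v with h | h
  · rw [primesB_of_le_one v (by omega)]; exact List.nodup_nil
  · exact pbLoop_nodup v 2 (le_refl 2) (Or.inl rfl) h (fun q hq _ => hq.two_le)

/- ---------- running minima as lists ---------- -/

def lminStep (o : Option Int) (p : Int) : Option Int :=
  match o with
  | none => some p
  | some b => some (if p < b then p else b)

def lmin (l : List Int) : Option Int := l.foldl lminStep none

theorem lmin_append (l : List Int) (p : Int) : lmin (l ++ [p]) = lminStep (lmin l) p := by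
  simp [lmin, List.foldl_append]

theorem lmin_eq_none_iff (l : List Int) : lmin l = none ↔ l = [] := by
  induction l using List.reverseRecOn with
  | nil => simp [lmin]
  | append_singleton l p ih =>
      rw [lmin_append]
      constructor
      · intro h; exfalso; cases hl : lmin l <;> rw [hl] at h <;> simp [lminStep] at h
      · intro h; exact absurd h (by simp)

theorem lmin_spec (l : List Int) : ∀ b : Int, lmin l = some b → b ∈ l ∧ ∀ p ∈ l, b ≤ p := by
  induction l using List.reverseRecOn with
  | nil => intro b h; simp [lmin] at h
  | append_singleton l p ih =>
      intro b h
      rw [lmin_append] at h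
      cases hl : lmin l with
      | none =>
          have hnil := (lmin_eq_none_iff l).mp hl
          subst hnil
          rw [hl] at h
          simp only [lminStep, Option.some.injEq] at h
          subst h
          simp
      | some b0 =>
          rw [hl] at h
          obtain ⟨hm, hle⟩ := ih b0 hl
          simp only [lminStep, Option.some.injEq] at h
          constructor
          · rw [← h]; split
            · exact List.mem_append_right _ (List.mem_singleton.mpr rfl)
            · exact List.mem_append_left _ hm
          · intro q hq
            rcases List.mem_append.mp hq with hq | hq
            · have := hle q hq; rw [← h]; split <;> omega
            · rw [List.mem_singleton] at hq; subst hq; rw [← h]; split <;> omega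

def vals (seen : List (Int × Int)) (P : Int → Bool) : List Int :=
  (seen.filter (fun ap => P ap.1)).map Prod.snd

theorem vals_append (seen : List (Int × Int)) (x prev : Int) (P : Int → Bool) :
    vals (seen ++ [(x, prev)]) P = vals seen P ++ (if P x then [prev] else []) := by
  cases h : P x <;> simp [vals, List.filter_append, h]

theorem mem_vals (seen : List (Int × Int)) (P : Int → Bool) (b : Int) :
    b ∈ vals seen P ↔ ∃ ap ∈ seen, P ap.1 ∧ ap.2 = b := by
  constructor
  · intro hb
    simp only [vals, List.mem_map, List.mem_filter] at hb
    obtain ⟨ap, ⟨hm, hP⟩, rfl⟩ := hb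
    exact ⟨ap, hm, hP, rfl⟩
  · rintro ⟨ap, hm, hP, rfl⟩
    simp only [vals, List.mem_map, List.mem_filter]
    exact ⟨ap, ⟨hm, hP⟩, rfl⟩

/- ---------- B's state invariant ---------- -/

def Binv (seen : List (Int × Int)) (best : PySem.Dict Nat Int) (bz bn : Option Int) : Prop :=
  (∀ q : Nat, best.get? q = lmin (vals seen (fun a => decide (q ∈ primesB a.natAbs))))
  ∧ bz = lmin (vals seen (fun a => decide (a.natAbs = 0)))
  ∧ bn = lmin (vals seen (fun a => decide (1 < a.natAbs)))

/- fold shapes used by bStep -/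

theorem qfold_cons (best : PySem.Dict Nat Int) (prev : Int) (p : Nat) (ks : List Nat) :
    qfold best prev (p :: ks)
    = qfold best (match best.get? p with
        | some b => if b < prev then b else prev
        | none => prev) ks := rfl

theorem q_step_le (best : PySem.Dict Nat Int) (prev : Int) (p : Nat) :
    (match best.get? p with
      | some b => if b < prev then b else prev
      | none => prev) ≤ prev := by
  cases hg : best.get? p
  · exact le_refl _
  · dsimp only; split <;> omega

theorem qfold_le_init (best : PySem.Dict Nat Int) (ks : List Nat) : ∀ prev : Int,
    qfold best prev ks ≤ prev := by
  induction ks with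
  | nil => intro prev; exact le_refl _
  | cons p ks ih =>
      intro prev
      rw [qfold_cons]
      exact le_trans (ih _) (q_step_le best prev p)

theorem qfold_le_entry (best : PySem.Dict Nat Int) (ks : List Nat) : ∀ (prev b : Int) (p : Nat),
    p ∈ ks → best.get? p = some b → qfold best prev ks ≤ b := by
  induction ks with
  | nil => intro _ _ _ h; simp at h
  | cons p0 ks ih =>
      intro prev b p hp hg
      rw [qfold_cons]
      rcases List.mem_cons.mp hp with rfl | hmem
      · refine le_trans (qfold_le_init best ks _) ?_
        rw [hg]; dsimp only; split <;> omega
      · exact ih _ b p hmem hg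

theorem qfold_cases (best : PySem.Dict Nat Int) (ks : List Nat) : ∀ prev : Int,
    qfold best prev ks = prev ∨ ∃ p ∈ ks, best.get? p = some (qfold best prev ks) := by
  induction ks with
  | nil => intro prev; exact Or.inl rfl
  | cons p0 ks ih =>
      intro prev
      rw [qfold_cons]
      cases hg0 : best.get? p0 with
      | none =>
          dsimp only
          rcases ih prev with h | ⟨p, hp, hg⟩
          · exact Or.inl h
          · exact Or.inr ⟨p, List.mem_cons_of_mem _ hp, hg⟩
      | some b =>
          dsimp only
          by_cases hb : b < prev
          · rw [if_pos hb]
            rcases ih b with h | ⟨p, hp, hg⟩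
            · exact Or.inr ⟨p0, List.mem_cons_self, by rw [hg0, h]⟩
            · exact Or.inr ⟨p, List.mem_cons_of_mem _ hp, hg⟩
          · rw [if_neg hb]
            rcases ih prev with h | ⟨p, hp, hg⟩
            · exact Or.inl h
            · exact Or.inr ⟨p, List.mem_cons_of_mem _ hp, hg⟩

theorem ufold_get?_not_mem (prev : Int) (ks : List Nat) : ∀ (best : PySem.Dict Nat Int) (q : Nat), q ∉ ks →
    (ufold best prev ks).get? q = best.get? q := by
  induction ks with
  | nil => intro best q _; rfl
  | cons p ks ih =>
      intro best q hq
      have hne : q ≠ p := fun he => hq (he ▸ List.mem_cons_self)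
      have hq' : q ∉ ks := fun hm => hq (List.mem_cons_of_mem _ hm)
      show (ufold (match best.get? p with
        | some b => if prev < b then best.insert p prev else best
        | none => best.insert p prev) prev ks).get? q = _
      rw [ih _ q hq']
      cases hg : best.get? p
      · exact PySem.Dict.get?_insert_of_ne best prev hne
      · dsimp only; split
        · exact PySem.Dict.get?_insert_of_ne best prev hne
        · rfl

theorem ufold_get?_mem (prev : Int) (ks : List Nat) : ∀ (best : PySem.Dict Nat Int) (q : Nat), ks.Nodup → q ∈ ks →
    (ufold best prev ks).get? q = lminStep (best.get? q) prev := by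
  induction ks with
  | nil => intro _ _ _ h; simp at h
  | cons p ks ih =>
      intro best q hnd hq
      obtain ⟨hp_nin, hnd'⟩ := List.nodup_cons.mp hnd
      rcases List.mem_cons.mp hq with rfl | hmem
      · show (ufold (match best.get? q with
          | some b => if prev < b then best.insert q prev else best
          | none => best.insert q prev) prev ks).get? q = _
        rw [ufold_get?_not_mem prev ks _ q hp_nin]
        cases hg : best.get? q
        · dsimp only
          rw [PySem.Dict.get?_insert_self]; rfl
        · rename_i b
          dsimp only
          split
          · rw [PySem.Dict.get?_insert_self]
            simp only [lminStep, Option.some.injEq]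
            omega
          · simp only [lminStep, hg, Option.some.injEq]
            omega
      · have hne : q ≠ p := fun he => hp_nin (he ▸ hmem)
        show (ufold (match best.get? p with
          | some b => if prev < b then best.insert p prev else best
          | none => best.insert p prev) prev ks).get? q = _
        rw [ih _ q hnd' hmem]
        congr 1
        cases hg : best.get? p
        · exact PySem.Dict.get?_insert_of_ne best prev hne
        · dsimp only; split
          · exact PySem.Dict.get?_insert_of_ne best prev hne
          · rfl

/- ---------- B: the query equals the scan over seen ---------- -/

theorem query_eq (seen : List (Int × Int)) (best : PySem.Dict Nat Int) (bz bn : Option Int)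
    (hinv : Binv seen best bz bn) (x prev : Int) :
    bQuery best bz bn prev x.natAbs = seenFold x prev seen := by
  have h1 := hinv.1
  rw [bQuery.eq_def]
  by_cases hv : 1 < x.natAbs
  · rw [if_pos hv]
    have hm1_le : qfold best prev (primesB x.natAbs) ≤ prev := qfold_le_init best _ prev
    have hm1cases : qfold best prev (primesB x.natAbs) = prev ∨
        ∃ ap ∈ seen, 1 < Int.gcd ap.1 x ∧ qfold best prev (primesB x.natAbs) = ap.2 := by
      rcases qfold_cases best (primesB x.natAbs) prev with h | ⟨p, hp, hg⟩
      · exact Or.inl h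
      · right
        rw [h1 p] at hg
        obtain ⟨ap, hap, hP, he⟩ := (mem_vals _ _ _).mp (lmin_spec _ _ hg).1
        refine ⟨ap, hap, ?_, he.symm⟩
        have hp' : p ∈ primesB ap.1.natAbs := by simpa using hP
        have ha2 : 1 < ap.1.natAbs := by
          by_contra hle
          rw [primesB_of_le_one _ (by omega)] at hp'
          simp at hp'
        have hmp := (mem_primesB _ (by omega) p).mp hp'
        have hpx : p ∣ x.natAbs := ((mem_primesB _ (by omega) p).mp hp).2
        exact (gcd_one_lt_iff ap.1 x).mpr (Or.inr (Or.inr ⟨ha2, hv, p, hmp.1, hmp.2, hpx⟩))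
    have hshared : ∀ ap ∈ seen, ∀ q : Nat, q.Prime → q ∣ ap.1.natAbs → q ∣ x.natAbs →
        1 < ap.1.natAbs → qfold best prev (primesB x.natAbs) ≤ ap.2 := by
      intro ap hap q hqp hqa hqx ha1
      have hqv : q ∈ primesB x.natAbs := (mem_primesB _ (by omega) q).mpr ⟨hqp, hqx⟩
      have hqa' : q ∈ primesB ap.1.natAbs := (mem_primesB _ (by omega) q).mpr ⟨hqp, hqa⟩
      have hmem : ap.2 ∈ vals seen (fun a => decide (q ∈ primesB a.natAbs)) :=
        (mem_vals _ _ _).mpr ⟨ap, hap, by simp [hqa'], rfl⟩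
      obtain ⟨b, hb⟩ : ∃ b, lmin (vals seen (fun a => decide (q ∈ primesB a.natAbs))) = some b := by
        cases hl : lmin (vals seen (fun a => decide (q ∈ primesB a.natAbs)))
        · rw [(lmin_eq_none_iff _).mp hl] at hmem; simp at hmem
        · exact ⟨_, rfl⟩
      have hble := (lmin_spec _ b hb).2 _ hmem
      have hq1 : best.get? q = some b := by rw [h1 q, hb]
      exact le_trans (qfold_le_entry best (primesB x.natAbs) prev b q hqv hq1) hble
    cases hbz : bz with
    | none =>
        have h2 : (none : Option Int) = lmin (vals seen (fun a => decide (a.natAbs = 0))) :=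
          hbz ▸ hinv.2.1
        show qfold best prev (primesB x.natAbs) = seenFold x prev seen
        symm; apply seenFold_eq_of_char
        · exact hm1_le
        · intro ap hap hc
          rcases (gcd_one_lt_iff ap.1 x).mp hc with ⟨ha0, hx1⟩ | ⟨hx0, ha1⟩ | ⟨ha1, hx1, q, hqp, hqa, hqx⟩
          · have hmem : ap.2 ∈ vals seen (fun a => decide (a.natAbs = 0)) :=
              (mem_vals _ _ _).mpr ⟨ap, hap, by simp [ha0], rfl⟩
            rw [(lmin_eq_none_iff _).mp h2.symm] at hmem
            simp at hmem
          · omega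
          · exact hshared ap hap q hqp hqa hqx ha1
        · exact hm1cases
    | some b =>
        have h2 : (some b : Option Int) = lmin (vals seen (fun a => decide (a.natAbs = 0))) :=
          hbz ▸ hinv.2.1
        have hbspec := lmin_spec _ b h2.symm
        show (if b < qfold best prev (primesB x.natAbs) then b else qfold best prev (primesB x.natAbs))
            = seenFold x prev seen
        have hr_le : (if b < qfold best prev (primesB x.natAbs) then b else qfold best prev (primesB x.natAbs))
            ≤ qfold best prev (primesB x.natAbs) := by split <;> omega
        symm; apply seenFold_eq_of_char
        · exact le_trans hr_le hm1_le
        · intro ap hap hc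
          rcases (gcd_one_lt_iff ap.1 x).mp hc with ⟨ha0, hx1⟩ | ⟨hx0, ha1⟩ | ⟨ha1, hx1, q, hqp, hqa, hqx⟩
          · have hmem : ap.2 ∈ vals seen (fun a => decide (a.natAbs = 0)) :=
              (mem_vals _ _ _).mpr ⟨ap, hap, by simp [ha0], rfl⟩
            have hble := hbspec.2 _ hmem
            split <;> omega
          · omega
          · have := hshared ap hap q hqp hqa hqx ha1
            split <;> omega
        · by_cases hb : b < qfold best prev (primesB x.natAbs)
          · rw [if_pos hb]
            right
            obtain ⟨ap, hap, hP, he⟩ := (mem_vals _ _ _).mp hbspec.1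
            exact ⟨ap, hap, (gcd_one_lt_iff ap.1 x).mpr (Or.inl ⟨by simpa using hP, hv⟩), he.symm⟩
          · rw [if_neg hb]
            exact hm1cases
  · rw [if_neg hv]
    by_cases hv0 : x.natAbs = 0
    · rw [if_pos hv0]
      cases hbn : bn with
      | none =>
          have h3 : (none : Option Int) = lmin (vals seen (fun a => decide (1 < a.natAbs))) :=
            hbn ▸ hinv.2.2
          show prev = seenFold x prev seen
          symm; apply seenFold_eq_of_char
          · exact le_refl _
          · intro ap hap hc
            rcases (gcd_one_lt_iff ap.1 x).mp hc with ⟨ha0, hx1⟩ | ⟨hx0, ha1⟩ | ⟨ha1, hx1, _⟩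
            · omega
            · have hmem : ap.2 ∈ vals seen (fun a => decide (1 < a.natAbs)) :=
                (mem_vals _ _ _).mpr ⟨ap, hap, by simp [ha1], rfl⟩
              rw [(lmin_eq_none_iff _).mp h3.symm] at hmem
              simp at hmem
            · omega
          · exact Or.inl rfl
      | some b =>
          have h3 : (some b : Option Int) = lmin (vals seen (fun a => decide (1 < a.natAbs))) :=
            hbn ▸ hinv.2.2
          have hbspec := lmin_spec _ b h3.symm
          show (if b < prev then b else prev) = seenFold x prev seen
          symm; apply seenFold_eq_of_char
          · split <;> omega
          · intro ap hap hc
            rcases (gcd_one_lt_iff ap.1 x).mp hc with ⟨ha0, hx1⟩ | ⟨hx0, ha1⟩ | ⟨ha1, hx1, _⟩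
            · omega
            · have hmem : ap.2 ∈ vals seen (fun a => decide (1 < a.natAbs)) :=
                (mem_vals _ _ _).mpr ⟨ap, hap, by simp [ha1], rfl⟩
              have hble := hbspec.2 _ hmem
              split <;> omega
            · omega
          · by_cases hb : b < prev
            · rw [if_pos hb]
              right
              obtain ⟨ap, hap, hP, he⟩ := (mem_vals _ _ _).mp hbspec.1
              exact ⟨ap, hap, (gcd_one_lt_iff ap.1 x).mpr (Or.inr (Or.inl ⟨hv0, by simpa using hP⟩)), he.symm⟩
            · rw [if_neg hb]
              exact Or.inl rfl
    · rw [if_neg hv0]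
      symm; apply seenFold_eq_of_char
      · exact le_refl _
      · intro ap hap hc
        rcases (gcd_one_lt_iff ap.1 x).mp hc with ⟨_, hx1⟩ | ⟨hx0, _⟩ | ⟨_, hx1, _⟩ <;> omega
      · exact Or.inl rfl

/- ---------- B: the update preserves the invariant ---------- -/

theorem update_inv (seen : List (Int × Int)) (best : PySem.Dict Nat Int) (bz bn : Option Int)
    (hinv : Binv seen best bz bn) (x prev : Int) :
    Binv (seen ++ [(x, prev)])
      (if 1 < x.natAbs then ufold best prev (primesB x.natAbs) else best)
      (if x.natAbs = 0 then some (bUpd bz prev) else bz)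
      (if 1 < x.natAbs then some (bUpd bn prev) else bn) := by
  obtain ⟨h1, h2, h3⟩ := hinv
  refine ⟨?_, ?_, ?_⟩
  · intro q
    rw [vals_append]
    by_cases hv : 1 < x.natAbs
    · rw [if_pos hv]
      by_cases hq : q ∈ primesB x.natAbs
      · rw [ufold_get?_mem prev _ best q (primesB_nodup _) hq, h1 q]
        rw [if_pos (by simpa using hq), lmin_append]
      · rw [ufold_get?_not_mem prev _ best q hq, h1 q]
        rw [if_neg (by simpa using hq), List.append_nil]
    · rw [if_neg hv]
      have hnot : q ∉ primesB x.natAbs := by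
        rw [primesB_of_le_one _ (by omega)]
        simp
      rw [h1 q, if_neg (by simpa using hnot), List.append_nil]
  · rw [vals_append]
    by_cases hv0 : x.natAbs = 0
    · rw [if_pos hv0, if_pos (by simp [hv0]), lmin_append, ← h2]
      cases bz <;> rfl
    · rw [if_neg hv0, if_neg (by simpa using hv0), List.append_nil, h2]
  · rw [vals_append]
    by_cases hv : 1 < x.natAbs
    · rw [if_pos hv, if_pos (by simpa using hv), lmin_append, ← h3]
      cases bn <;> rfl
    · rw [if_neg hv, if_neg (by simpa using hv), List.append_nil, h3]

theorem B_loop (xs : List Int) : ∀ (seen : List (Int × Int)) (best : PySem.Dict Nat Int)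
    (bz bn : Option Int) (prev : Int), Binv seen best bz bn →
    (xs.foldl bStep (best, bz, bn, prev, prev)).2.2.2.2 = goRef seen prev xs := by
  induction xs with
  | nil => intro seen best bz bn prev _; rfl
  | cons x rest ih =>
      intro seen best bz bn prev hinv
      rw [List.foldl_cons]
      have hstep : bStep (best, bz, bn, prev, prev) x =
        ((if 1 < x.natAbs then ufold best prev (primesB x.natAbs) else best),
         (if x.natAbs = 0 then some (bUpd bz prev) else bz),
         (if 1 < x.natAbs then some (bUpd bn prev) else bn),
         bQuery best bz bn prev x.natAbs + 1,
         bQuery best bz bn prev x.natAbs + 1) := rfl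
      rw [hstep, query_eq seen best bz bn hinv x prev]
      exact ih (seen ++ [(x, prev)]) _ _ _ _ (update_inv seen best bz bn hinv x prev)

theorem alt_eq_goRef (nums : List Int) : minCutGcd_alt nums = goRef [] 0 nums := by
  refine B_loop nums [] PySem.Dict.empty none none 0 ?_
  refine ⟨fun q => ?_, rfl, rfl⟩
  simp [PySem.Dict.get?_empty, vals, lmin]

/- ---------- A: the array dp computes goAll ---------- -/

theorem setfold (dp : List Int) (k : Nat) (hk : k < dp.length) (c : Nat → Prop) [DecidablePred c] :
    ∀ (l : List Nat), (∀ j ∈ l, j < k) → ∀ x : Int,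
    l.foldl (fun dp' jn => if c jn then
        dp'.set k (min (dp'.getD k 0) (if jn = 0 then 1 else dp'.getD (jn - 1) 0 + 1))
      else dp') (dp.set k x)
    = dp.set k (l.foldl (fun m jn => if c jn then
        min m (if jn = 0 then 1 else dp.getD (jn - 1) 0 + 1) else m) x) := by
  intro l
  induction l with
  | nil => intro _ x; rfl
  | cons j l ih =>
      intro hl x
      have hjk : j < k := hl j List.mem_cons_self
      have hl' : ∀ i ∈ l, i < k := fun i hi => hl i (List.mem_cons_of_mem _ hi)
      rw [List.foldl_cons, List.foldl_cons]
      by_cases hc : c j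
      · rw [if_pos hc, if_pos hc]
        have h1 : (dp.set k x).getD k 0 = x := by
          rw [List.getD_eq_getElem?_getD, List.getElem?_set_self hk]; rfl
        have h2 : (if j = 0 then (1:Int) else (dp.set k x).getD (j - 1) 0 + 1)
            = (if j = 0 then 1 else dp.getD (j - 1) 0 + 1) := by
          by_cases hj0 : j = 0
          · rw [if_pos hj0, if_pos hj0]
          · rw [if_neg hj0, if_neg hj0, List.getD_eq_getElem?_getD, List.getD_eq_getElem?_getD,
              List.getElem?_set_ne (show k ≠ j - 1 by omega)]
        rw [h1, h2, List.set_set]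
        exact ih hl' _
      · rw [if_neg hc, if_neg hc]
        exact ih hl' _

theorem aInner_set (nums : List Int) (dp : List Int) (k : Nat) (x : Int) (hk : k < dp.length) :
    aInner nums (k : Int) (dp.set k x) =
    dp.set k ((List.range k).foldl (fun m jn =>
      if 1 < Int.gcd (nums.getD jn 0) (nums.getD k 0) then
        min m (if jn = 0 then 1 else dp.getD (jn - 1) 0 + 1)
      else m) x) := by
  unfold aInner
  rw [PySem.List.pyRange_zero_nat k, List.foldl_map]
  have hpoint : ∀ (acc : List Int), ∀ jn ∈ List.range k,
      (if 1 < Int.gcd (PySem.List.pyGetD nums ((jn : Nat) : Int) 0) (PySem.List.pyGetD nums ((k : Nat) : Int) 0) then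
        PySem.List.pySetD acc ((k : Nat) : Int) (min (PySem.List.pyGetD acc ((k : Nat) : Int) 0)
          (if 0 ≤ ((jn : Nat) : Int) - 1 then PySem.List.pyGetD acc (((jn : Nat) : Int) - 1) 0 + 1 else 1))
      else acc)
      = (fun (dp' : List Int) (jn : Nat) =>
          if 1 < Int.gcd (nums.getD jn 0) (nums.getD k 0) then
            dp'.set k (min (dp'.getD k 0) (if jn = 0 then 1 else dp'.getD (jn - 1) 0 + 1))
          else dp') acc jn := by
    intro acc jn _
    dsimp only
    have hgets : (if 0 ≤ ((jn : Nat) : Int) - 1 then PySem.List.pyGetD acc (((jn : Nat) : Int) - 1) 0 + 1 else 1)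
        = (if jn = 0 then (1:Int) else acc.getD (jn - 1) 0 + 1) := by
      by_cases hj0 : jn = 0
      · subst hj0; rw [if_neg (by norm_num), if_pos rfl]
      · rw [if_pos (by omega), if_neg hj0]
        have hcast : (((jn : Nat) : Int) - 1) = (((jn - 1 : Nat) : Nat) : Int) := by omega
        rw [hcast, PySem.List.pyGetD_natCast]
    rw [PySem.List.pyGetD_natCast, PySem.List.pyGetD_natCast, PySem.List.pySetD_natCast,
      PySem.List.pyGetD_natCast, hgets]
  rw [PySem.List.foldl_congr_mem (List.range k) _ _ (dp.set k x) hpoint]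
  exact setfold dp k hk (fun jn => 1 < Int.gcd (nums.getD jn 0) (nums.getD k 0)) (List.range k)
    (fun j hj => List.mem_range.mp hj) x

theorem foldl_min_add_one (x : Int) (l : List (Int × Int)) : ∀ m0 : Int,
    l.foldl (fun m ap => if 1 < Int.gcd ap.1 x then min m (ap.2 + 1) else m) (m0 + 1)
    = seenFold x m0 l + 1 := by
  induction l with
  | nil => intro m0; rfl
  | cons a l ih =>
      intro m0
      have hstep : (if 1 < Int.gcd a.1 x then min (m0 + 1) (a.2 + 1) else m0 + 1)
          = (if 1 < Int.gcd a.1 x then min m0 a.2 else m0) + 1 := by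
        split
        · exact min_add_add_right _ _ _
        · rfl
      rw [List.foldl_cons, hstep]
      exact ih _

theorem outer_loop (nums : List Int) : ∀ (m k : Nat), k + m = nums.length → 1 ≤ k →
    (PySem.List.pyRange (k : Int) (nums.length : Int) 1).foldl
      (fun dp i => aInner nums i (PySem.List.pySetD dp i (PySem.List.pyGetD dp (i - 1) 0 + 1)))
      ((goAll [] 0 nums).take k ++ List.replicate m 0)
    = goAll [] 0 nums := by
  intro m
  induction m with
  | zero =>
      intro k hkm _
      have hcast : ((k : Nat) : Int) = ((nums.length : Nat) : Int) := by omega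
      rw [hcast, PySem.List.pyRange_one_eq_nil (le_refl _), List.foldl_nil,
        List.replicate_zero, List.append_nil]
      have hD : (goAll [] 0 nums).length = nums.length := goAll_length nums [] 0
      have hkl : k = (goAll [] 0 nums).length := by omega
      rw [hkl, List.take_length]
  | succ m ih =>
      intro k hkm hk1
      have hklt : k < nums.length := by omega
      have hD : (goAll [] 0 nums).length = nums.length := goAll_length nums [] 0
      set D := goAll [] 0 nums with hDdef
      set dp := D.take k ++ List.replicate (m + 1) (0 : Int) with hdp
      have htk : (D.take k).length = k := by rw [List.length_take]; omega
      have hget : ∀ j, j < k → dp.getD j 0 = D.getD j 0 := by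
        intro j hj
        rw [hdp, List.getD_eq_getElem?_getD, List.getD_eq_getElem?_getD,
          List.getElem?_append_left (by omega), List.getElem?_take, if_pos hj]
      have hcons : PySem.List.pyRange (k : Int) (nums.length : Int) 1
          = (k : Int) :: PySem.List.pyRange ((k : Int) + 1) (nums.length : Int) 1 :=
        PySem.List.pyRange_one_cons (by exact_mod_cast hklt)
      rw [hcons, List.foldl_cons]
      have hprev : PySem.List.pyGetD dp ((k : Int) - 1) 0 = D.getD (k - 1) 0 := by
        have hcast : ((k : Int) - 1) = (((k - 1 : Nat)) : Int) := by omega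
        rw [hcast, PySem.List.pyGetD_natCast]
        exact hget _ (by omega)
      have hset : PySem.List.pySetD dp ((k : Int)) (PySem.List.pyGetD dp ((k : Int) - 1) 0 + 1)
          = dp.set k (D.getD (k - 1) 0 + 1) := by
        rw [PySem.List.pySetD_natCast, hprev]
      rw [hset, aInner_set nums dp k _ (by rw [hdp, List.length_append, htk, List.length_replicate]; omega)]
      have hval : (List.range k).foldl (fun m jn =>
          if 1 < Int.gcd (nums.getD jn 0) (nums.getD k 0) then
            min m (if jn = 0 then 1 else dp.getD (jn - 1) 0 + 1)
          else m) (D.getD (k - 1) 0 + 1) = D.getD k 0 := by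
        have hpt : ∀ (acc : Int), ∀ jn ∈ List.range k,
            (if 1 < Int.gcd (nums.getD jn 0) (nums.getD k 0) then
              min acc (if jn = 0 then 1 else dp.getD (jn - 1) 0 + 1)
            else acc)
            = (fun (m : Int) (jn : Nat) =>
                if 1 < Int.gcd ((fun j => (nums.getD j 0, (0 :: D).getD j 0)) jn).1 (nums.getD k 0) then
                  min m (((fun j => (nums.getD j 0, (0 :: D).getD j 0)) jn).2 + 1)
                else m) acc jn := by
          intro acc jn hjn
          have hjk : jn < k := List.mem_range.mp hjn
          have hvr : (if jn = 0 then (1:Int) else dp.getD (jn - 1) 0 + 1) = (0 :: D).getD jn 0 + 1 := by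
            by_cases hj0 : jn = 0
            · subst hj0; rw [if_pos rfl, List.getD_cons_zero]; norm_num
            · rw [if_neg hj0]
              obtain ⟨j', rfl⟩ : ∃ j', jn = j' + 1 := ⟨jn - 1, by omega⟩
              rw [List.getD_cons_succ, hget _ (by omega)]
              simp
          dsimp only
          rw [hvr]
        rw [PySem.List.foldl_congr_mem (List.range k) _ _ _ hpt]
        rw [← List.foldl_map
          (g := fun (m : Int) (ap : Int × Int) =>
            if 1 < Int.gcd ap.1 (nums.getD k 0) then min m (ap.2 + 1) else m)
          (f := fun j => (nums.getD j 0, (0 :: D).getD j 0))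
          (l := List.range k) (init := D.getD (k - 1) 0 + 1)]
        have hinit : D.getD (k - 1) 0 = (0 :: D).getD k 0 := by
          obtain ⟨k', rfl⟩ : ∃ k', k = k' + 1 := ⟨k - 1, by omega⟩
          rw [List.getD_cons_succ]
          simp
        rw [hinit, foldl_min_add_one]
        have hkey := goAll_getD nums [] 0 k hklt
        rw [List.nil_append] at hkey
        exact hkey.symm
      rw [hval]
      have hDk : D[k]? = some (D.getD k 0) := by
        have hx : k < D.length := by omega
        rw [List.getD_eq_getElem?_getD, List.getElem?_eq_getElem hx]
        rfl
      have hsetk : dp.set k (D.getD k 0) = D.take (k + 1) ++ List.replicate m 0 := by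
        rw [hdp, List.set_append, if_neg (by omega), htk, Nat.sub_self, List.replicate_succ,
          List.set_cons_zero, List.take_succ, hDk]
        simp
      rw [hsetk]
      have hcast2 : ((k : Int) + 1) = (((k + 1 : Nat)) : Int) := by push_cast; ring
      rw [hcast2]
      exact ih (k + 1) (by omega) (by omega)

theorem A_eq_goRef (nums : List Int) (hne : nums ≠ []) : minCutGcd nums = goRef [] 0 nums := by
  have hlen : 1 ≤ nums.length := List.length_pos_of_ne_nil hne
  have hD : (goAll [] 0 nums).length = nums.length := goAll_length nums [] 0
  obtain ⟨n', hn'⟩ : ∃ n', nums.length = n' + 1 := ⟨nums.length - 1, by omega⟩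
  have hstart : minCutGcd nums
      = PySem.List.pyGetD ((PySem.List.pyRange (((1 : Nat)) : Int) ((nums.length : Nat) : Int) 1).foldl
          (fun dp i => aInner nums i (PySem.List.pySetD dp i (PySem.List.pyGetD dp (i - 1) 0 + 1)))
          (PySem.List.pySetD (List.replicate ((((nums.length : Nat)) : Int)).toNat 0) 0 1)) (-1) 0 := rfl
  have hD0 : (goAll [] 0 nums).getD 0 0 = 1 := by
    have hk := goAll_getD nums [] 0 0 (by omega)
    simpa using hk
  have hD0' : (goAll [] 0 nums)[0]? = some 1 := by
    have hx : 0 < (goAll [] 0 nums).length := by omega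
    rw [List.getD_eq_getElem?_getD, List.getElem?_eq_getElem hx] at hD0
    rw [List.getElem?_eq_getElem hx]
    simpa using hD0
  have h0 : PySem.List.pySetD (List.replicate ((((nums.length : Nat)) : Int)).toNat (0 : Int)) 0 1
      = (goAll [] 0 nums).take 1 ++ List.replicate (nums.length - 1) 0 := by
    rw [PySem.List.pySetD_of_nonneg _ 1 (le_refl 0), show ((0 : Int)).toNat = 0 from rfl,
      Int.toNat_natCast]
    rw [hn', List.replicate_succ, List.set_cons_zero]
    rw [show (1 : Nat) = 0 + 1 from rfl, List.take_succ, List.take_zero, hD0']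
    simp [hn']
  rw [hstart, h0]
  rw [outer_loop nums (nums.length - 1) 1 (by omega) (le_refl 1)]
  have hDne : goAll [] 0 nums ≠ [] := by
    intro h
    rw [h] at hD
    simp at hD
    omega
  rw [PySem.List.pyGetD_neg_one _ 0 hDne]
  have hlast := goAll_getLast? nums [] 0 hne
  rw [List.getLast?_eq_getLast hDne] at hlast
  exact Option.some.inj hlast

-- ===== VERDICT =====
theorem minCutGcd_spec : Claim_equal_minCutGcd := by
  intro nums _ hpre
  show minCutGcd nums = minCutGcd_alt nums
  rw [A_eq_goRef nums hpre, alt_eq_goRef]
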